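-- pv_equiv track=rewrite | github.com/rockywang101/codefights123 | 08_matrixElementsSum.py | matrixElementsSumOld
-- ===== SOURCE A (Python) =====
-- def matrixElementsSumOld(matrix):
--
--     noteArr = []
--     for i in range(len(matrix[0])):
--         noteArr.append("O")
--
--     total = 0
--     for arr in matrix:
--         for i in range(len(arr)):
--             if noteArr[i] == "X":
--                 pass
--             else:
--                 if arr[i] == 0:
--                     noteArr[i] = 'X'
--                 else:
--                     total += arr[i]
--
--     return total
-- ===== SOURCE B (Python) =====
-- def matrixElementsSumOld(matrix):
--     cols = [[] for _ in matrix[0]]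
--     for row in matrix:
--         for c, v in enumerate(row):
--             cols[c].append(v)
--     total = 0
--     for col in cols:
--         for v in col:
--             if v == 0:
--                 break
--             total += v
--     return total
-- ===== Notes on version B (the rewrite author's own statement) =====
-- stated objective: alternative
-- what changed: B first builds the transpose (per-column lists) and then sums each column up to its first zero with a break, instead of A's single row-major pass over a persistent 'O'/'X' column-mask list.
import Mathlib
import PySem

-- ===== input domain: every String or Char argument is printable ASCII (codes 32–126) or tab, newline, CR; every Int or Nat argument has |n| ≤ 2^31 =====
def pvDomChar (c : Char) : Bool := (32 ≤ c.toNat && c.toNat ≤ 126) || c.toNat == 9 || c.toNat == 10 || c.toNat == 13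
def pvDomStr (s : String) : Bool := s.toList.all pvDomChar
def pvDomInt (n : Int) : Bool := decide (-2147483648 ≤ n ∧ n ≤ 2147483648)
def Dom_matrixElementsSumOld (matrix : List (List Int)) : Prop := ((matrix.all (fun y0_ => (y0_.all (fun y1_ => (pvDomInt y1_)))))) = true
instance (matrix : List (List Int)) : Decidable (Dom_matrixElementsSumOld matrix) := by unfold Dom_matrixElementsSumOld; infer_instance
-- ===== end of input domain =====

-- B builds the transpose (per-column lists) and sums each column up to its first zero,
-- instead of A's row-major pass over a persistent "O"/"X" column-mask list (alternative decomposition).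

-- ===== PORT A =====
-- inner loop body of A: for i in range(len(arr)), reading noteArr[i] / arr[i].
-- Both indexings are in range under Pre_ (arr[i] always; noteArr[i] because row lengths ≤ len(matrix[0]));
-- the getD defaults are never reached inside Pre_.
def stepI (arr : List Int) (st : List String × Int) (i : Nat) : List String × Int :=
  if st.1.getD i "X" == "X" then st
  else if arr.getD i 0 == 0 then (st.1.set i "X", st.2)
  else (st.1, st.2 + arr.getD i 0)

def rowStep (st : List String × Int) (arr : List Int) : List String × Int :=
  (List.range arr.length).foldl (stepI arr) st

def matrixElementsSumOld (matrix : List (List Int)) : Int :=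
  -- noteArr = ["O"] * len(matrix[0]); matrix[0] raises IndexError on the empty matrix (excluded by Pre_)
  let noteArr := (List.range (matrix.headD []).length).foldl (fun a _ => a ++ ["O"]) ([] : List String)
  (matrix.foldl rowStep (noteArr, 0)).2

-- ===== PORT B =====
-- cols[c].append(v): the index c from enumerate is ≥ 0, so .toNat is exact; it is in range
-- under Pre_ (Python raises IndexError there otherwise, as A does)
def appendStep (cols : List (List Int)) (p : Int × Int) : List (List Int) :=
  cols.set p.1.toNat (cols.getD p.1.toNat [] ++ [p.2])

def buildCols (matrix : List (List Int)) : List (List Int) :=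
  -- cols = [[] for _ in matrix[0]]; matrix[0] raises IndexError on the empty matrix (excluded by Pre_)
  matrix.foldl (fun cols row => (PySem.List.enumerate row).foldl appendStep cols)
    ((matrix.headD []).map (fun _ => ([] : List Int)))

-- the inner `for v in col: if v == 0: break; total += v` loop, as the value it adds to total
def sumColB : List Int → Int
  | [] => 0
  | v :: rest => if v = 0 then 0 else v + sumColB rest

def matrixElementsSumOld_alt (matrix : List (List Int)) : Int :=
  (buildCols matrix).foldl (fun total col => total + sumColB col) 0

-- ===== PRECONDITION & SPEC =====
-- Pre_ excludes exactly the inputs where BOTH Pythons raise IndexError: the empty matrix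
-- (matrix[0]) and matrices with a row longer than row 0 (A's noteArr[i] / B's cols[c] out of range).
def Pre_matrixElementsSumOld (matrix : List (List Int)) : Prop :=
  matrix ≠ [] ∧ ∀ row ∈ matrix, row.length ≤ (matrix.headD []).length
instance (matrix : List (List Int)) : Decidable (Pre_matrixElementsSumOld matrix) := by
  unfold Pre_matrixElementsSumOld; infer_instance

def pvWitness_matrixElementsSumOld : List (List Int) := [[1, 2], [0, 3]]

def Spec_matrixElementsSumOld (matrix : List (List Int)) (out : Int) : Prop := out = matrixElementsSumOld_alt matrix
instance (matrix : List (List Int)) (out : Int) : Decidable (Spec_matrixElementsSumOld matrix out) := by unfold Spec_matrixElementsSumOld; infer_instance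

-- ===== CLAIM (what is proved, stated in full; the proofs are below) =====
def Claim_equal_matrixElementsSumOld : Prop := ∀ (matrix : List (List Int)), Dom_matrixElementsSumOld matrix → Pre_matrixElementsSumOld matrix → Spec_matrixElementsSumOld matrix (matrixElementsSumOld matrix)

-- ===== LEMMAS AND PROOFS =====

-- common abstraction both programs compute per column: the sum of column c down to its first zero
def colA : List (List Int) → Nat → Int
  | [], _ => 0
  | row :: rest, c =>
    if c < row.length then
      if row[c]?.getD 0 = 0 then 0 else row[c]?.getD 0 + colA rest c
    else colA rest c

-- the entries of column c in row order (rows too short for c skipped) — what buildCols puts into cols[c]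
def colList : List (List Int) → Nat → List Int
  | [], _ => []
  | row :: rest, c =>
    if c < row.length then row[c]?.getD 0 :: colList rest c else colList rest c

-- the per-row term added to the total at column i by A's inner loop
def termA (note : List String) (arr : List Int) (i : Nat) : Int :=
  if note[i]?.getD "X" ≠ "X" ∧ arr[i]?.getD 0 ≠ 0 then arr[i]?.getD 0 else 0

theorem noteInit_eq (w : Nat) :
    (List.range w).foldl (fun a _ => a ++ ["O"]) ([] : List String) = List.replicate w "O" := by
  induction w with
  | zero => rfl
  | succ n ih =>
      rw [List.range_succ, List.foldl_append, ih, List.foldl_cons, List.foldl_nil,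
        ← List.replicate_succ']

theorem if_shrink {α : Type} (n c : Nat) (P : Prop) [Decidable P] (x : α) (N : α)
    (h : c = n → ¬ P) :
    (if c < n + 1 ∧ P then x else N) = (if c < n ∧ P then x else N) := by
  by_cases hc : c = n
  · rw [if_neg (fun hx => h hc hx.2), if_neg (fun hx => by omega)]
  · have hiff : (c < n + 1 ∧ P) ↔ (c < n ∧ P) := by
      constructor
      · rintro ⟨h1, h2⟩; exact ⟨by omega, h2⟩
      · rintro ⟨h1, h2⟩; exact ⟨by omega, h2⟩
    rw [if_congr hiff rfl rfl]

theorem inner_char (arr : List Int) (n : Nat) (note : List String) (total : Int)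
    (hn : n ≤ arr.length) (hw : arr.length ≤ note.length) :
    ((List.range n).foldl (stepI arr) (note, total)).1.length = note.length ∧
    (∀ c, ((List.range n).foldl (stepI arr) (note, total)).1[c]?.getD "X" =
      if c < n ∧ note[c]?.getD "X" ≠ "X" ∧ arr[c]?.getD 0 = 0 then "X" else note[c]?.getD "X") ∧
    ((List.range n).foldl (stepI arr) (note, total)).2 =
      total + ∑ i ∈ Finset.range n, termA note arr i := by
  induction n with
  | zero =>
      refine ⟨rfl, fun c => ?_, by simp⟩
      simp
  | succ n ih =>
      obtain ⟨hl, hpt, ht⟩ := ih (Nat.le_of_succ_le hn)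
      rw [List.range_succ, List.foldl_append, List.foldl_cons, List.foldl_nil]
      set r := (List.range n).foldl (stepI arr) (note, total) with hr
      have hnn : r.1[n]?.getD "X" = note[n]?.getD "X" := by
        rw [hpt n]; rw [if_neg (fun hx => by omega)]
      have hnlt : n < arr.length := hn
      have hnnote : n < note.length := lt_of_lt_of_le hnlt hw
      unfold stepI
      simp only [List.getD_eq_getElem?_getD]
      rw [hnn]
      by_cases h1 : note[n]?.getD "X" = "X"
      · rw [if_pos (by simp [h1])]
        refine ⟨hl, fun c => ?_, ?_⟩
        · rw [hpt c, if_shrink]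
          intro hc; rw [hc]; rintro ⟨hA, _⟩; exact hA h1
        · rw [ht, Finset.sum_range_succ]
          have h0 : termA note arr n = 0 := by simp [termA, h1]
          rw [h0, add_zero]
      · rw [if_neg (by simp [h1])]
        by_cases h2 : arr[n]?.getD 0 = 0
        · rw [if_pos (by simp [h2])]
          refine ⟨by rw [List.length_set]; exact hl, fun c => ?_, ?_⟩
          · by_cases hc : c = n
            · rw [hc, List.getElem?_set_self (by rw [hl]; exact hnnote)]
              rw [if_pos ⟨by omega, h1, h2⟩]; rfl
            · rw [List.getElem?_set_ne (fun he => hc he.symm), hpt c, if_shrink]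
              intro he; exact absurd he hc
          · rw [ht, Finset.sum_range_succ]
            have h0 : termA note arr n = 0 := by simp [termA, h2]
            rw [h0, add_zero]
        · rw [if_neg (by simp [h2])]
          refine ⟨hl, fun c => ?_, ?_⟩
          · rw [hpt c, if_shrink]
            intro hc; rw [hc]; rintro ⟨_, hB⟩; exact h2 hB
          · rw [ht, Finset.sum_range_succ]
            have h0 : termA note arr n = arr[n]?.getD 0 := by simp [termA, h1, h2]
            rw [h0]; ring

theorem outer_char (rows : List (List Int)) (note : List String) (total : Int)
    (h : ∀ r ∈ rows, r.length ≤ note.length) :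
    (rows.foldl rowStep (note, total)).2 =
      total + ∑ c ∈ Finset.range note.length,
        (if note[c]?.getD "X" ≠ "X" then colA rows c else 0) := by
  induction rows generalizing note total with
  | nil => simp [colA]
  | cons row rest ih =>
      have hrow : row.length ≤ note.length := h row (by simp)
      rw [List.foldl_cons]
      obtain ⟨hl, hpt, ht⟩ := inner_char row row.length note total le_rfl hrow
      have hrs : rowStep (note, total) row = (List.range row.length).foldl (stepI row) (note, total) := rfl
      rw [hrs]
      set r := (List.range row.length).foldl (stepI row) (note, total) with hr
      have hsplit : (rest.foldl rowStep r).2 = (rest.foldl rowStep (r.1, r.2)).2 := rfl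
      rw [hsplit, ih r.1 r.2 (fun rr hrr => by rw [hl]; exact h rr (List.mem_cons_of_mem _ hrr))]
      rw [ht, hl]
      have hext : ∑ i ∈ Finset.range row.length, termA note row i =
          ∑ i ∈ Finset.range note.length, termA note row i := by
        apply Finset.sum_subset
        · intro x hx
          simp only [Finset.mem_range] at hx ⊢
          omega
        · intro i _ hi
          have hge : ¬ i < row.length := by simpa using hi
          have h0 : row[i]?.getD 0 = 0 := by
            rw [List.getElem?_eq_none (by omega)]; rfl
          simp [termA, h0]
      rw [hext, add_assoc, ← Finset.sum_add_distrib]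
      congr 1
      apply Finset.sum_congr rfl
      intro c hc
      rw [hpt c]
      by_cases h1 : note[c]?.getD "X" = "X"
      · simp [termA, h1]
      · by_cases h2 : c < row.length
        · have hcs : colA (row :: rest) c =
              if row[c]?.getD 0 = 0 then 0 else row[c]?.getD 0 + colA rest c := by
            simp [colA, h2]
          simp [termA, h1, h2, hcs]
          split_ifs <;> ring
        · have hcs : colA (row :: rest) c = colA rest c := by
            simp [colA, h2]
          have h0 : row[c]?.getD 0 = 0 := by
            rw [List.getElem?_eq_none (by omega)]; rfl
          simp [termA, h1, h2, h0, hcs]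

-- B-side: one row's enumerate-fold appends row[c] to cols[c] for every c < row.length
theorem append_fold_char (row : List Int) (s : Nat) (cols : List (List Int))
    (hle : s + row.length ≤ cols.length) :
    ((PySem.List.enumerate row (s : Int)).foldl appendStep cols).length = cols.length ∧
    ∀ c : Nat, ((PySem.List.enumerate row (s : Int)).foldl appendStep cols)[c]? =
      if h : s ≤ c ∧ c < s + row.length then some (cols.getD c [] ++ [row[c - s]?.getD 0])
      else cols[c]? := by
  induction row generalizing s cols with
  | nil =>
      refine ⟨by simp [PySem.List.enumerate_nil], fun c => ?_⟩
      rw [dif_neg (by simp only [List.length_nil]; omega)]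
      simp [PySem.List.enumerate_nil]
  | cons v rest ih =>
      rw [PySem.List.enumerate_cons, List.foldl_cons]
      have hstep : appendStep cols ((s : Int), v) =
          cols.set s (cols.getD s [] ++ [v]) := by
        simp [appendStep]
      rw [hstep]
      have hs1 : ((s : Int) + 1) = ((s + 1 : Nat) : Int) := by push_cast; ring
      rw [hs1]
      have hle' : (s + 1) + rest.length ≤ (cols.set s (cols.getD s [] ++ [v])).length := by
        rw [List.length_set]; simpa [Nat.add_assoc, Nat.add_comm 1 rest.length] using hle
      obtain ⟨ihl, ihp⟩ := ih (s + 1) _ hle'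
      refine ⟨by rw [ihl, List.length_set], fun c => ?_⟩
      rw [ihp c]
      by_cases hin : s + 1 ≤ c ∧ c < s + 1 + rest.length
      · rw [dif_pos hin, dif_pos (by constructor <;> [omega; (simp; omega)])]
        have hgd : (cols.set s (cols.getD s [] ++ [v])).getD c [] = cols.getD c [] := by
          rw [List.getD_eq_getElem?_getD, List.getElem?_set_ne (by omega),
            ← List.getD_eq_getElem?_getD]
        rw [hgd]
        have hidx : (v :: rest)[c - s]?.getD 0 = rest[c - (s + 1)]?.getD 0 := by
          have : c - s = (c - (s + 1)) + 1 := by omega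
          rw [this]; simp
        rw [hidx]
      · by_cases hcs : c = s
        · have hslen : s < cols.length := by
            simp only [List.length_cons] at hle; omega
          rw [dif_neg hin, hcs, List.getElem?_set_self hslen,
            dif_pos ⟨le_refl s, by simp only [List.length_cons]; omega⟩]
          simp
        · rw [dif_neg hin, List.getElem?_set_ne (fun he => hcs he.symm),
            dif_neg (by simp only [List.length_cons]; omega)]

-- B-side: buildCols-style fold appends column c's entries to cols[c]
theorem build_fold_char (rows : List (List Int)) (cols : List (List Int))
    (h : ∀ r ∈ rows, r.length ≤ cols.length) :
    (rows.foldl (fun cols row => (PySem.List.enumerate row).foldl appendStep cols) cols).length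
      = cols.length ∧
    ∀ c : Nat, c < cols.length →
      (rows.foldl (fun cols row => (PySem.List.enumerate row).foldl appendStep cols) cols)[c]? =
        some (cols.getD c [] ++ colList rows c) := by
  induction rows generalizing cols with
  | nil =>
      refine ⟨rfl, fun c hc => ?_⟩
      rw [List.foldl_nil, List.getElem?_eq_getElem hc]
      simp [colList, List.getD_eq_getElem?_getD, List.getElem?_eq_getElem hc]
  | cons row rest ih =>
      have hrow : row.length ≤ cols.length := h row (by simp)
      rw [List.foldl_cons]
      have henum : PySem.List.enumerate row = PySem.List.enumerate row ((0 : Nat) : Int) := by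
        norm_num [PySem.List.enumerate]
      rw [henum]
      obtain ⟨al, ap⟩ := append_fold_char row 0 cols (by omega)
      set cols1 := (PySem.List.enumerate row ((0 : Nat) : Int)).foldl appendStep cols with hc1
      obtain ⟨bl, bp⟩ := ih cols1 (fun r hr => by rw [al]; exact h r (List.mem_cons_of_mem _ hr))
      refine ⟨by rw [bl, al], fun c hc => ?_⟩
      rw [bp c (by rw [al]; exact hc)]
      have hgd : cols1.getD c [] = cols.getD c [] ++ (if c < row.length then [row[c]?.getD 0] else []) := by
        rw [List.getD_eq_getElem?_getD, ap c]
        by_cases hcr : c < row.length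
        · rw [dif_pos (by omega)]
          simp [hcr, List.getElem?_eq_getElem]
        · rw [dif_neg (by omega), if_neg hcr, ← List.getD_eq_getElem?_getD]
          simp
      rw [hgd]
      by_cases hcr : c < row.length
      · have : colList (row :: rest) c = row[c]?.getD 0 :: colList rest c := by
          simp [colList, hcr]
        rw [this, if_pos hcr, List.append_assoc]
        rfl
      · have : colList (row :: rest) c = colList rest c := by
          simp [colList, hcr]
        rw [this, if_neg hcr, List.append_nil]

theorem buildCols_eq (matrix : List (List Int))
    (h : ∀ r ∈ matrix, r.length ≤ (matrix.headD []).length) :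
    buildCols matrix = (List.range (matrix.headD []).length).map (fun c => colList matrix c) := by
  set w := (matrix.headD []).length with hw
  have hinit : ((matrix.headD []).map (fun _ => ([] : List Int))).length = w := by
    rw [List.length_map]
  obtain ⟨bl, bp⟩ := build_fold_char matrix ((matrix.headD []).map (fun _ => ([] : List Int)))
    (fun r hr => by rw [hinit]; exact h r hr)
  apply List.ext_getElem?
  intro c
  by_cases hc : c < w
  · unfold buildCols
    rw [bp c (by rw [hinit]; exact hc)]
    have hgd : ((matrix.headD []).map (fun _ => ([] : List Int))).getD c [] = [] := by
      rw [List.getD_eq_getElem?_getD, List.getElem?_eq_getElem (by rw [hinit]; exact hc)]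
      simp
    rw [hgd, List.nil_append]
    rw [List.getElem?_map, List.getElem?_eq_getElem (by simpa using hc)]
    simp
  · have hbl : (buildCols matrix).length = w := by
      unfold buildCols; rw [bl, hinit]
    rw [List.getElem?_eq_none (by rw [hbl]; omega),
      List.getElem?_eq_none (by rw [List.length_map, List.length_range]; omega)]

theorem sumColB_colList (rows : List (List Int)) (c : Nat) :
    sumColB (colList rows c) = colA rows c := by
  induction rows with
  | nil => rfl
  | cons row rest ih =>
      by_cases hc : c < row.length
      · simp [colList, colA, hc, sumColB, ih]
      · simp [colList, colA, hc, ih]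

theorem foldl_add_sum (f : Nat → Int) (w : Nat) (t : Int) :
    (List.range w).foldl (fun total c => total + f c) t = t + ∑ c ∈ Finset.range w, f c := by
  induction w generalizing t with
  | zero => simp
  | succ n ih =>
      rw [List.range_succ, List.foldl_append, List.foldl_cons, List.foldl_nil, ih,
        Finset.sum_range_succ]
      ring

-- ===== VERDICT (by name: the statement is the Claim_ definition above) =====
theorem matrixElementsSumOld_spec : Claim_equal_matrixElementsSumOld := by
  intro matrix _ hpre
  obtain ⟨hne, hrows⟩ := hpre
  unfold Spec_matrixElementsSumOld matrixElementsSumOld matrixElementsSumOld_alt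
  set w := (matrix.headD []).length with hw
  rw [noteInit_eq w]
  have hlen : (List.replicate w "O").length = w := by simp
  rw [outer_char matrix (List.replicate w "O") 0
      (fun r hr => by rw [hlen]; exact hrows r hr), hlen]
  rw [buildCols_eq matrix hrows, List.foldl_map, foldl_add_sum (fun c => sumColB (colList matrix c)) w 0]
  rw [zero_add, zero_add]
  apply Finset.sum_congr rfl
  intro c hc
  have hrep : (List.replicate w "O")[c]?.getD "X" = "O" := by
    rw [List.getElem?_replicate, if_pos (Finset.mem_range.mp hc)]; rfl
  rw [hrep, if_pos (by decide), sumColB_colList]
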